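-- pv_equiv track=rewrite | github.com/JeongHwiBeen/Undergraduate | JournalCrawling/PMID_crawling.py | generate_date_ranges
-- ===== SOURCE A (Python) =====
-- def generate_date_ranges(years):
--     date_ranges = []
--     for year in years:
--         date_ranges.append((f"{year}/01/01", f"{year}/03/31"))
--         date_ranges.append((f"{year}/04/01", f"{year}/06/30"))
--         if year == 2024:
--             date_ranges.append((f"{year}/07/01", f"{year}/08/31"))
--         else:
--             date_ranges.append((f"{year}/07/01", f"{year}/09/30"))
--             date_ranges.append((f"{year}/10/01", f"{year}/12/31"))
--     return date_ranges
-- ===== SOURCE B (Python) =====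
-- def generate_date_ranges(years):
--     # Quarter endpoints are computed arithmetically from the quarter index q:
--     # a quarter starts on month 3q+1 day 1 and ends on month 3q+3 (day 31 for
--     # Q1/Q4, else 30); 2024 has only 3 quarters and its last one ends 08/31.
--     def block(y):
--         n = 3 if y == 2024 else 4
--         out = []
--         for q in range(n):
--             em = 8 if (y == 2024 and q == 2) else 3 * q + 3
--             ed = 31 if (y == 2024 and q == 2) or q in (0, 3) else 30
--             out.append((f"{y}/{3*q+1:02d}/01", f"{y}/{em:02d}/{ed:02d}"))
--         return out
--     result = []
--     for y in years:
--         result.extend(block(y))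
--     return result
-- ===== Notes on version B (the rewrite author's own statement) =====
-- stated objective: alternative
-- what changed: Instead of hard-coding the four quarter tuples as inline appends with a duplicated 2024 branch, B derives each quarter's start/end month and day arithmetically from the quarter index (quarter q spans month 3q+1 to 3q+3, day 31 for Q1/Q4 else 30, with 2024 reduced to 3 quarters ending 08/31) and formats them with zero-padding in an inner loop.
import Mathlib
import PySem

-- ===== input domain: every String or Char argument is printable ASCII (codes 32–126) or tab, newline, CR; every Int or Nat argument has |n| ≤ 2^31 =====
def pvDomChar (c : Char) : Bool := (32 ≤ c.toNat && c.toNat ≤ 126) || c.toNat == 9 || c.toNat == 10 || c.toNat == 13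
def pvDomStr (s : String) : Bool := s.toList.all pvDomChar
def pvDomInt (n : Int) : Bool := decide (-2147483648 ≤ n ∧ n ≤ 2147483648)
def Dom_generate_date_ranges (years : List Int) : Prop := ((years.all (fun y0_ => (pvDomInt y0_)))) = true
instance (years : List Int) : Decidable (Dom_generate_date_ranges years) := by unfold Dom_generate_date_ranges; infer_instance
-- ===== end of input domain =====

-- B computes quarter endpoints arithmetically from the quarter index instead of hard-coding them (alternative decomposition, same cost).


-- ===== PORT A =====
def generate_date_ranges (years : List Int) : List (String × String) :=
  years.foldl (fun date_ranges year =>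
    let date_ranges := date_ranges ++ [(PySem.Int.toStr year ++ "/01/01", PySem.Int.toStr year ++ "/03/31")]
    let date_ranges := date_ranges ++ [(PySem.Int.toStr year ++ "/04/01", PySem.Int.toStr year ++ "/06/30")]
    if year = 2024 then
      date_ranges ++ [(PySem.Int.toStr year ++ "/07/01", PySem.Int.toStr year ++ "/08/31")]
    else
      (date_ranges ++ [(PySem.Int.toStr year ++ "/07/01", PySem.Int.toStr year ++ "/09/30")])
        ++ [(PySem.Int.toStr year ++ "/10/01", PySem.Int.toStr year ++ "/12/31")]) []

-- ===== PORT B =====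
-- f"{m:02d}" for the month/day ints produced here (all in 1..31)
def pvPad2 (n : Int) : String := if n < 10 then "0" ++ PySem.Int.toStr n else PySem.Int.toStr n

def pvBlock (y : Int) : List (String × String) :=
  let n : Int := if y = 2024 then 3 else 4
  (PySem.List.pyRange 0 n 1).foldl (fun out q =>
    let em := if y = 2024 ∧ q = 2 then 8 else 3 * q + 3
    let ed := if (y = 2024 ∧ q = 2) ∨ q = 0 ∨ q = 3 then (31 : Int) else 30
    out ++ [(PySem.Int.toStr y ++ "/" ++ pvPad2 (3 * q + 1) ++ "/01",
             PySem.Int.toStr y ++ "/" ++ pvPad2 em ++ "/" ++ pvPad2 ed)]) []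

def generate_date_ranges_alt (years : List Int) : List (String × String) :=
  years.foldl (fun result y => result ++ pvBlock y) []

-- ===== PRECONDITION & SPEC =====
def Spec_generate_date_ranges (years : List Int) (out : List (String × String)) : Prop := out = generate_date_ranges_alt years
instance (years : List Int) (out : List (String × String)) : Decidable (Spec_generate_date_ranges years out) := by unfold Spec_generate_date_ranges; infer_instance

-- ===== CLAIM (what is proved, stated in full; the proofs are below) =====
def Claim_equal_generate_date_ranges : Prop := ∀ (years : List Int), Dom_generate_date_ranges years → Spec_generate_date_ranges years (generate_date_ranges years)

-- ===== LEMMAS AND PROOFS =====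

-- B's arithmetic quarter block evaluates to the tuples A appends for that year
theorem pv_block_eq (year : Int) :
    pvBlock year =
    (if year = 2024 then
      [(PySem.Int.toStr year ++ "/01/01", PySem.Int.toStr year ++ "/03/31"),
       (PySem.Int.toStr year ++ "/04/01", PySem.Int.toStr year ++ "/06/30"),
       (PySem.Int.toStr year ++ "/07/01", PySem.Int.toStr year ++ "/08/31")]
    else
      [(PySem.Int.toStr year ++ "/01/01", PySem.Int.toStr year ++ "/03/31"),
       (PySem.Int.toStr year ++ "/04/01", PySem.Int.toStr year ++ "/06/30"),
       (PySem.Int.toStr year ++ "/07/01", PySem.Int.toStr year ++ "/09/30"),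
       (PySem.Int.toStr year ++ "/10/01", PySem.Int.toStr year ++ "/12/31")]) := by
  by_cases h : year = 2024 <;>
    simp [pvBlock, h, show PySem.List.pyRange 0 3 1 = [0, 1, 2] from by decide,
      show PySem.List.pyRange 0 4 1 = [0, 1, 2, 3] from by decide,
      pvPad2, PySem.Int.toStr, String.append_assoc] <;> decide

-- B's extend fold equals the flat concatenation of blocks
theorem pv_ext_fold (years : List Int) (acc : List (String × String)) :
    years.foldl (fun result y => result ++ pvBlock y) acc
    = acc ++ years.flatMap pvBlock := by
  induction years generalizing acc with
  | nil => simp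
  | cons y ys ih => simp [ih]

-- A's fold appends exactly the flat concatenation of blocks
theorem pv_foldl_eq (years : List Int) (acc : List (String × String)) :
    years.foldl (fun date_ranges year =>
      let date_ranges := date_ranges ++ [(PySem.Int.toStr year ++ "/01/01", PySem.Int.toStr year ++ "/03/31")]
      let date_ranges := date_ranges ++ [(PySem.Int.toStr year ++ "/04/01", PySem.Int.toStr year ++ "/06/30")]
      if year = 2024 then
        date_ranges ++ [(PySem.Int.toStr year ++ "/07/01", PySem.Int.toStr year ++ "/08/31")]
      else
        (date_ranges ++ [(PySem.Int.toStr year ++ "/07/01", PySem.Int.toStr year ++ "/09/30")])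
          ++ [(PySem.Int.toStr year ++ "/10/01", PySem.Int.toStr year ++ "/12/31")]) acc
    = acc ++ years.flatMap pvBlock := by
  induction years generalizing acc with
  | nil => simp
  | cons y ys ih =>
    simp only [List.foldl_cons]
    rw [ih]
    simp only [List.flatMap_cons, pv_block_eq]
    split <;> simp

-- ===== VERDICT (by name: the statement is the Claim_ definition above) =====
theorem generate_date_ranges_spec : Claim_equal_generate_date_ranges := by
  intro years _
  unfold Spec_generate_date_ranges generate_date_ranges generate_date_ranges_alt
  rw [pv_ext_fold years []]
  simpa using pv_foldl_eq years []
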